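-- pv_equiv track=rewrite | github.com/srrrs-7/Go_Algorithm | test/5.py | solution
-- ===== SOURCE A (Python) =====
-- def solution(A):
--     start = 0
--     end = start + 1
--     longest = 0
--
--     A.sort()
--     while end <= len(A):
--         tmp = A[start:end]
--         if amplitude(tmp) < 2:
--             end += 1
--             if len(tmp) > longest:
--                 longest = len(tmp)
--         else:
--             start = end
--             end = start + 1
--     return longest
--
-- def amplitude(tmp):
--     if len(tmp) < 2:
--         return 0
--     else:
--         return max(tmp) - min(tmp)
-- ===== SOURCE B (Python) =====
-- def solution(A):
--     # Note: like the original, this sorts A in place (observable mutation).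
--     A.sort()
--     n = len(A)
--     longest = 0
--     i = 0
--     while i < n:
--         j = i
--         while j < n and A[j] - A[i] < 2:
--             j += 1
--         if j - i > longest:
--             longest = j - i
--         i = j + 1
--     return longest
-- ===== Notes on version B (the rewrite author's own statement) =====
-- stated objective: faster
-- what changed: Replaces the quadratic slice-and-rescan (recomputing max/min of A[start:end] for every window) by a single linear greedy segment scan over the sorted array that compares A[j]-A[i] in O(1), keeping the same skip-the-failing-element jump behaviour.
import Mathlib
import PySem

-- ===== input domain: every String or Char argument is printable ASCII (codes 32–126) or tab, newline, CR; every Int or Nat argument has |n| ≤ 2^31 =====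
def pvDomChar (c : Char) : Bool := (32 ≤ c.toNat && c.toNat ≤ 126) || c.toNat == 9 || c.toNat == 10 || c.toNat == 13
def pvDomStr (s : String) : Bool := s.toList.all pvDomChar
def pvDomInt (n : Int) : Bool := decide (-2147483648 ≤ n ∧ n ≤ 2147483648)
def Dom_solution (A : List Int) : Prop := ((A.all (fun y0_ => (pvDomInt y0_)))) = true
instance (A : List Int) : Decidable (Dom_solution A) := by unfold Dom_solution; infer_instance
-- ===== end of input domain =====

-- B replaces A's quadratic slice-and-rescan by a linear greedy segment scan on the
-- sorted array (objective: faster). Both Pythons sort A in place; the equivalence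
-- proved here is about the return value.

-- ===== PORT A =====
-- amplitude(tmp): max/min guarded by the length test, so getD 0 is never the value used
def pvAmplitude (tmp : List Int) : Int :=
  if tmp.length < 2 then 0
  else (PySem.List.max? tmp (fun x => x)).getD 0 - (PySem.List.min? tmp (fun x => x)).getD 0

-- the while loop of A; each iteration increases `e` by 1 (slice A[start:e] with
-- nonnegative Nat bounds is exactly drop/take = PySem.List.slice on naturals)
def pvLoopA (A : List Int) (start e longest : Nat) : Nat :=
  if e ≤ A.length then
    let tmp := (A.drop start).take (e - start)
    if pvAmplitude tmp < 2 then
      pvLoopA A start (e + 1) (if tmp.length > longest then tmp.length else longest)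
    else
      pvLoopA A e (e + 1) longest
  else longest
termination_by A.length + 1 - e
decreasing_by all_goals omega

def solution (A : List Int) : Int :=
  ((pvLoopA (PySem.List.sorted A (fun x => x) false) 0 1 0 : Nat) : Int)

-- ===== PORT B =====
-- inner while: advance j while j < n and A[j] - A[i] < 2
def pvInnerB (A : List Int) (i j : Nat) : Nat :=
  if j < A.length ∧ A.getD j 0 - A.getD i 0 < 2 then pvInnerB A i (j + 1) else j
termination_by A.length - j
decreasing_by omega

theorem pvInnerB_ge (A : List Int) (i j : Nat) : j ≤ pvInnerB A i j := by
  fun_induction pvInnerB A i j with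
  | case1 j h ih => omega
  | case2 j h => omega

-- outer while over segment starts
def pvOuterB (A : List Int) (i longest : Nat) : Nat :=
  if _h : i < A.length then
    let j := pvInnerB A i i
    pvOuterB A (j + 1) (if j - i > longest then j - i else longest)
  else longest
termination_by A.length - i
decreasing_by have := pvInnerB_ge A i i; omega

def solution_alt (A : List Int) : Int :=
  ((pvOuterB (PySem.List.sorted A (fun x => x) false) 0 0 : Nat) : Int)

-- ===== PRECONDITION & SPEC =====
def Spec_solution (A : List Int) (out : Int) : Prop := out = solution_alt A
instance (A : List Int) (out : Int) : Decidable (Spec_solution A out) := by unfold Spec_solution; infer_instance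

-- ===== CLAIM (what is proved, stated in full; the proofs are below) =====
def Claim_equal_solution : Prop := ∀ (A : List Int), Dom_solution A → Spec_solution A (solution A)

-- ===== LEMMAS AND PROOFS =====

theorem pvAmplitude_slice (A : List Int) (hs : A.Pairwise (· ≤ ·)) (i j : Nat)
    (hij : i ≤ j) (hj : j < A.length) :
    pvAmplitude ((A.drop i).take (j + 1 - i)) = A.getD j 0 - A.getD i 0 := by
  have hmono : ∀ p q (hp : p < A.length) (hq : q < A.length), p ≤ q → A[p] ≤ A[q] := by
    intro p q hp hq hpq
    rcases eq_or_lt_of_le hpq with h | h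
    · subst h; exact le_refl _
    · exact List.pairwise_iff_getElem.mp hs p q hp hq h
  set tmp := (A.drop i).take (j + 1 - i) with htmp
  have hlen : tmp.length = j + 1 - i := by
    simp only [htmp, List.length_take, List.length_drop]; omega
  have hget : ∀ k (hk : k < j + 1 - i), tmp[k]'(by omega) = A[i + k]'(by omega) := by
    intro k hk
    simp [htmp, List.getElem_take, List.getElem_drop]
  have hDi : A.getD i 0 = A[i]'(by omega) := List.getD_eq_getElem A 0 (by omega)
  have hDj : A.getD j 0 = A[j]'(by omega) := List.getD_eq_getElem A 0 (by omega)
  have hbound : ∀ x ∈ tmp, A[i]'(by omega) ≤ x ∧ x ≤ A[j]'(by omega) := by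
    intro x hx
    obtain ⟨k, hk, hkeq⟩ := List.mem_iff_getElem.mp hx
    rw [hlen] at hk
    rw [hget k hk] at hkeq
    exact hkeq ▸ ⟨hmono i (i+k) (by omega) (by omega) (by omega),
                  hmono (i+k) j (by omega) (by omega) (by omega)⟩
  have hmemi : A[i]'(by omega) ∈ tmp := by
    have := hget 0 (by omega)
    simp only [Nat.add_zero] at this
    exact this ▸ List.getElem_mem _
  have hmemj : A[j]'(by omega) ∈ tmp := by
    have := hget (j - i) (by omega)
    refine List.mem_iff_getElem.mpr ⟨j - i, by omega, ?_⟩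
    rw [hget (j - i) (by omega)]
    simp only [Nat.add_sub_cancel' hij]
  rcases eq_or_lt_of_le hij with hieq | hilt
  · subst hieq
    have : tmp.length < 2 := by omega
    simp only [pvAmplitude, if_pos this, hDi]
    omega
  · have h2 : ¬ tmp.length < 2 := by omega
    obtain ⟨m, hm⟩ : ∃ m, PySem.List.max? tmp (fun x => x) = some m := by
      cases hmx : PySem.List.max? tmp (fun x => x) with
      | none => exact absurd ((PySem.List.max?_eq_none_iff _ _).mp hmx) (by intro h; simp [h] at hlen; omega)
      | some m => exact ⟨m, rfl⟩
    obtain ⟨n, hn⟩ : ∃ n, PySem.List.min? tmp (fun x => x) = some n := by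
      cases hmn : PySem.List.min? tmp (fun x => x) with
      | none => exact absurd ((PySem.List.min?_eq_none_iff _ _).mp hmn) (by intro h; simp [h] at hlen; omega)
      | some n => exact ⟨n, rfl⟩
    have hmv : m = A[j]'(by omega) := by
      have h1 : m ≤ A[j]'(by omega) := (hbound m (PySem.List.max?_mem hm)).2
      have h2 : A[j]'(by omega) ≤ m := PySem.List.max?_isMax hm _ hmemj
      omega
    have hnv : n = A[i]'(by omega) := by
      have h1 : A[i]'(by omega) ≤ n := (hbound n (PySem.List.min?_mem hn)).1
      have h2 : n ≤ A[i]'(by omega) := PySem.List.min?_isMin hn _ hmemi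
      omega
    simp only [pvAmplitude, if_neg h2, hm, hn, hmv, hnv, Option.getD_some, hDi, hDj]

theorem pvBridge (A : List Int) (hs : A.Pairwise (· ≤ ·)) (i j L : Nat)
    (hij : i ≤ j) (hL : j - i ≤ L) :
    pvLoopA A i (j + 1) L =
      pvOuterB A (pvInnerB A i j + 1)
        (if pvInnerB A i j - i > L then pvInnerB A i j - i else L) := by
  by_cases hj : j < A.length
  · by_cases hc : A.getD j 0 - A.getD i 0 < 2
    · -- window passes
      have hJ : pvInnerB A i j = pvInnerB A i (j + 1) := by
        conv_lhs => rw [pvInnerB]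
        rw [if_pos ⟨hj, hc⟩]
      have hJge : j + 1 ≤ pvInnerB A i (j + 1) := pvInnerB_ge A i (j + 1)
      have hlen : ((A.drop i).take (j + 1 - i)).length = j + 1 - i := by
        simp only [List.length_take, List.length_drop]; omega
      rw [pvLoopA, if_pos (by omega : j + 1 ≤ A.length)]
      simp only [pvAmplitude_slice A hs i j hij hj, if_pos hc, hlen]
      rw [pvBridge A hs i (j + 1)
        (if j + 1 - i > L then j + 1 - i else L) (by omega) (by split_ifs <;> omega)]
      rw [← hJ]
      congr 1
      split_ifs <;> omega
    · -- window fails at j < len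
      have hJ : pvInnerB A i j = j := by
        rw [pvInnerB, if_neg (by tauto)]
      rw [pvLoopA, if_pos (by omega : j + 1 ≤ A.length)]
      simp only [pvAmplitude_slice A hs i j hij hj, if_neg hc]
      have hstep := pvBridge A hs (j + 1) (j + 1) L le_rfl (by omega)
      rw [show j + 1 + 1 = j + 2 from rfl] at hstep
      rw [hstep, hJ, if_neg (by omega : ¬ j - i > L)]
      -- RHS: pvOuterB A (j+1) L; unfold it once
      conv_rhs => rw [pvOuterB]
      by_cases hj1 : j + 1 < A.length
      · rw [dif_pos hj1]
      · rw [dif_neg hj1]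
        have hJ1 : pvInnerB A (j + 1) (j + 1) = j + 1 := by
          rw [pvInnerB, if_neg (by tauto)]
        rw [hJ1, if_neg (by omega), pvOuterB, dif_neg (by omega)]
  · -- j ≥ length: loop exits
    have hJ : pvInnerB A i j = j := by
      rw [pvInnerB, if_neg (by tauto)]
    rw [pvLoopA, if_neg (by omega), hJ, if_neg (by omega),
      pvOuterB, dif_neg (by omega)]
termination_by (A.length + 1 - i, A.length + 1 - j)
decreasing_by
  · exact Prod.Lex.right _ (by omega)
  · exact Prod.Lex.left _ _ (by omega)

theorem pvLoop_eq_outer (A : List Int) (hs : A.Pairwise (· ≤ ·)) (i L : Nat) :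
    pvLoopA A i (i + 1) L = pvOuterB A i L := by
  have hb := pvBridge A hs i i L le_rfl (by omega)
  by_cases hi : i < A.length
  · rw [hb]
    conv_rhs => rw [pvOuterB, dif_pos hi]
  · have hJ : pvInnerB A i i = i := by
      rw [pvInnerB, if_neg (by tauto)]
    rw [hb, hJ, if_neg (by omega), pvOuterB, dif_neg (by omega),
      pvOuterB, dif_neg (by omega)]

-- ===== VERDICT (by name: the statement is the Claim_ definition above) =====
theorem solution_spec : Claim_equal_solution := by
  intro A _
  unfold Spec_solution solution solution_alt
  have := pvLoop_eq_outer (PySem.List.sorted A (fun x => x) false)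
    (PySem.List.sorted_pairwise A (fun x => x)) 0 0
  rw [this]
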